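-- pv_equiv track=rewrite | github.com/carriercomm/ircd | ircd/kernel/irc_access.py | parse_mask
-- ===== SOURCE A (Python) =====
-- def parse_mask(mask):
--     part_syms = {'!': 1, '@': 2, '$': 3}
--     parts = ['', '', '', '']
--     cur = 0
--
--     for c in mask:
--         if c in part_syms:
--             cur = part_syms[c]
--             parts[cur] = ''
--         else:
--             parts[cur] += c
--
--     parts = [part or '*' for part in parts]
--     return '{0}!{1}@{2}${3}'.format(*parts)
-- ===== SOURCE B (Python) =====
-- def parse_mask(mask):
--     # Scan from the end: the segment after the LAST occurrence of each
--     # delimiter is the one that survives, so first-seen-from-the-back wins.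
--     syms = {'!': 1, '@': 2, '$': 3}
--     parts = [None, None, None, None]
--     buf = ''
--     for c in reversed(mask):
--         if c in syms:
--             i = syms[c]
--             if parts[i] is None:
--                 parts[i] = buf
--             buf = ''
--         else:
--             buf = c + buf
--     parts[0] = buf
--     return '{0}!{1}@{2}${3}'.format(*[p or '*' for p in parts])
-- ===== Notes on version B (the rewrite author's own statement) =====
-- stated objective: alternative
-- what changed: Replaces A's forward scan with a cursor state machine (each delimiter resets and redirects appends) by a single backward scan that buffers a segment and lets the first delimiter seen from the back claim it (last occurrence wins), with part 0 taking the leftover buffer.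
import Mathlib
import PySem

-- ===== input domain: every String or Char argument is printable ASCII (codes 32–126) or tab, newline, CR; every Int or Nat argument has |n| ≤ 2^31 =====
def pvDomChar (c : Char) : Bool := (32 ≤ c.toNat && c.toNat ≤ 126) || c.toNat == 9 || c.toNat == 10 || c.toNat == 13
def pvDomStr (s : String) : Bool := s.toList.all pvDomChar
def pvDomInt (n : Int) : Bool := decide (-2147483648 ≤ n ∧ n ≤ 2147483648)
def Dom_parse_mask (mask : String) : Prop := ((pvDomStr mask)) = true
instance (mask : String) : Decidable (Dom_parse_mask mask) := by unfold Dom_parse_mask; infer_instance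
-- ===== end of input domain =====

-- B replaces A's forward cursor-state machine by a single backward scan where the
-- first delimiter seen from the back claims the buffered segment (alternative
-- decomposition, same cost); equivalence is proved for every string.

-- ===== PORT A =====
-- A's loop over mask with state (parts, cur); the dict membership/lookup on the
-- three literal delimiter keys is ported as explicit character comparisons.
def loopA : List Char → List Char → List Char → List Char → List Char → Nat →
    List Char × List Char × List Char × List Char
  | [], p0, p1, p2, p3, _ => (p0, p1, p2, p3)
  | c :: cs, p0, p1, p2, p3, cur =>
    if c = '!' then loopA cs p0 [] p2 p3 1
    else if c = '@' then loopA cs p0 p1 [] p3 2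
    else if c = '$' then loopA cs p0 p1 p2 [] 3
    else match cur with
      | 1 => loopA cs p0 (p1 ++ [c]) p2 p3 cur
      | 2 => loopA cs p0 p1 (p2 ++ [c]) p3 cur
      | 3 => loopA cs p0 p1 p2 (p3 ++ [c]) cur
      | _ => loopA cs (p0 ++ [c]) p1 p2 p3 cur

-- `part or '*'`
def orStar (p : List Char) : List Char := if p = [] then ['*'] else p

def parse_mask (mask : String) : String :=
  match loopA mask.toList [] [] [] [] 0 with
  | (p0, p1, p2, p3) =>
    String.ofList (orStar p0 ++ ['!'] ++ orStar p1 ++ ['@'] ++ orStar p2 ++ ['$'] ++ orStar p3)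

-- ===== PORT B =====
-- B's `for c in reversed(mask)` is the right-to-left recursion below (c is
-- processed after the suffix); parts 1..3 are Option (None until claimed).
def loopB : List Char →
    (Option (List Char) × Option (List Char) × Option (List Char)) × List Char
  | [] => ((none, none, none), [])
  | c :: cs =>
    match loopB cs with
    | ((q1, q2, q3), buf) =>
      if c = '!' then ((if q1 = none then some buf else q1, q2, q3), [])
      else if c = '@' then ((q1, if q2 = none then some buf else q2, q3), [])
      else if c = '$' then ((q1, q2, if q3 = none then some buf else q3), [])
      else ((q1, q2, q3), c :: buf)

-- `p or '*'` on a possibly-None part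
def fillB : Option (List Char) → List Char
  | none => ['*']
  | some p => if p = [] then ['*'] else p

def parse_mask_alt (mask : String) : String :=
  match loopB mask.toList with
  | ((q1, q2, q3), buf) =>
    String.ofList (fillB (some buf) ++ ['!'] ++ fillB q1 ++ ['@'] ++ fillB q2 ++ ['$'] ++ fillB q3)

-- ===== PRECONDITION & SPEC =====
def Spec_parse_mask (mask : String) (out : String) : Prop := out = parse_mask_alt mask
instance (mask : String) (out : String) : Decidable (Spec_parse_mask mask out) := by unfold Spec_parse_mask; infer_instance

-- ===== CLAIM (what is proved, stated in full; the proofs are below) =====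
def Claim_equal_parse_mask : Prop := ∀ (mask : String), Dom_parse_mask mask → Spec_parse_mask mask (parse_mask mask)

-- ===== LEMMAS AND PROOFS =====

-- default for an unclaimed part
def fOpt (q : Option (List Char)) (d : List Char) : List Char := q.getD d

lemma key (cs : List Char) : ∀ p0 p1 p2 p3 : List Char,
    loopA cs p0 p1 p2 p3 0 =
      (p0 ++ (loopB cs).2, fOpt (loopB cs).1.1 p1, fOpt (loopB cs).1.2.1 p2, fOpt (loopB cs).1.2.2 p3) ∧
    loopA cs p0 p1 p2 p3 1 =
      (p0, fOpt (loopB cs).1.1 (p1 ++ (loopB cs).2), fOpt (loopB cs).1.2.1 p2, fOpt (loopB cs).1.2.2 p3) ∧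
    loopA cs p0 p1 p2 p3 2 =
      (p0, fOpt (loopB cs).1.1 p1, fOpt (loopB cs).1.2.1 (p2 ++ (loopB cs).2), fOpt (loopB cs).1.2.2 p3) ∧
    loopA cs p0 p1 p2 p3 3 =
      (p0, fOpt (loopB cs).1.1 p1, fOpt (loopB cs).1.2.1 p2, fOpt (loopB cs).1.2.2 (p3 ++ (loopB cs).2)) := by
  induction cs with
  | nil => intro p0 p1 p2 p3; simp [loopA, loopB, fOpt]
  | cons c cs ih =>
    intro p0 p1 p2 p3
    by_cases h1 : c = '!'
    · subst h1
      simp only [loopA, loopB]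
      cases hq : (loopB cs).1.1 <;>
        simp_all [fOpt, ih p0 [] p2 p3]
    · by_cases h2 : c = '@'
      · subst h2
        simp only [loopA, loopB]
        cases hq : (loopB cs).1.2.1 <;>
          simp_all [fOpt, ih p0 p1 [] p3]
      · by_cases h3 : c = '$'
        · subst h3
          simp only [loopA, loopB]
          cases hq : (loopB cs).1.2.2 <;>
            simp_all [fOpt, ih p0 p1 p2 []]
        · simp only [loopA, loopB, if_neg h1, if_neg h2, if_neg h3]
          refine ⟨?_, ?_, ?_, ?_⟩
          · simpa using (ih (p0 ++ [c]) p1 p2 p3).1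
          · simpa using (ih p0 (p1 ++ [c]) p2 p3).2.1
          · simpa using (ih p0 p1 (p2 ++ [c]) p3).2.2.1
          · simpa using (ih p0 p1 p2 (p3 ++ [c])).2.2.2

-- ===== VERDICT (by name: the statement is the Claim_ definition above) =====
theorem parse_mask_spec : Claim_equal_parse_mask := by
  intro mask _
  unfold Spec_parse_mask parse_mask parse_mask_alt
  have h := (key mask.toList [] [] [] []).1
  cases hB : loopB mask.toList with
  | mk qs buf =>
    rcases qs with ⟨q1, q2, q3⟩
    rw [hB] at h
    simp only [h]
    cases q1 <;> cases q2 <;> cases q3 <;> simp [fillB, orStar, fOpt]
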